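-- pv_equiv track=rewrite | github.com/uibcdf/PyPharmer | V_025/Tools/clique_analyzer.py | merge_cliques
-- ===== SOURCE A (Python) =====
-- def merge_cliques(cliques_set):
--     list_of_sets = []
--     final_list_of_sets = []
--     clique_list = sorted(cliques_set, key=str.__len__)
--
--     [list_of_sets.append(set(c.split(' '))) for c in clique_list]
--
--     index = 0
--     max_len = len(list_of_sets)
--     while index < max_len:
--         set1 = list_of_sets[index]
--
--         if is_biggest_subset(set1, list_of_sets, index+1, max_len):
--             final_list_of_sets.append(sorted(set1))
--
--         index+=1
--
--     return final_list_of_sets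
--
-- def is_biggest_subset(set1, sets, index, max_len):
--     while index < max_len:
--         if set1.issubset(sets[index]):
--             return False
--
--         index +=1
--
--     return True
-- ===== SOURCE B (Python) =====
-- def merge_cliques(cliques_set):
--     sets = [set(c.split(' ')) for c in sorted(cliques_set, key=len)]
--     occ = {}
--     for j, s in enumerate(sets):
--         for x in s:
--             occ.setdefault(x, []).append(j)
--     out = []
--     for i, s in enumerate(sets):
--         toks = sorted(s)
--         cand = min((occ[x] for x in toks), key=len)
--         covered = False
--         for j in reversed(cand):
--             if j <= i:
--                 break
--             if s <= sets[j]: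
--                 covered = True
--                 break
--         if not covered:
--             out.append(toks)
--     return out
-- ===== Notes on version B (the rewrite author's own statement) =====
-- stated objective: faster
-- what changed: Replaces A's per-clique linear scan of all later sets (is_biggest_subset) with an inverted index from token to the indices of the sets containing it; each clique is tested only against the candidate supersets sharing its rarest token, walking candidates newest-first and stopping at indices at or below its own.
import Mathlib
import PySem

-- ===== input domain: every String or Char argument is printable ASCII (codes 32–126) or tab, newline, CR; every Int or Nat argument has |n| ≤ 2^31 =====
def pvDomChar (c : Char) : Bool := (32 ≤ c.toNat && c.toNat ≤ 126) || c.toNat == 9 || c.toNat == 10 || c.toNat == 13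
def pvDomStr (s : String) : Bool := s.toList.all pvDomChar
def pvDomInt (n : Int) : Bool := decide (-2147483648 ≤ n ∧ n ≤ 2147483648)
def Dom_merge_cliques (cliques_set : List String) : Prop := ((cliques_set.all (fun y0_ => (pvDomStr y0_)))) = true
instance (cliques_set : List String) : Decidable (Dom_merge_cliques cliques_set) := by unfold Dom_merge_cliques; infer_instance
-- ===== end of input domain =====

-- B replaces A's scan of ALL later sets per clique by an inverted index on the tokens: a clique is
-- checked only against the candidate supersets sharing its rarest token, newest candidates first.

-- ===== PORT A =====
-- c.split(' ') with the non-empty literal separator ' ': split? is always `some` here, getD [] only totalizes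
def pvSplitSpace (c : String) : List String := (PySem.Str.split? c " ").getD []

def is_biggest_subset (set1 : PySem.Set String) (sets : List (PySem.Set String)) (index max_len : Nat) : Bool :=
  if index < max_len then
    if PySem.Set.issubset set1 (sets.getD index []) then false
    else is_biggest_subset set1 sets (index + 1) max_len
  else true
termination_by max_len - index

def pvMergeLoop (list_of_sets : List (PySem.Set String)) (index max_len : Nat)
    (final_list_of_sets : List (List String)) : List (List String) :=
  if index < max_len then
    let set1 := list_of_sets.getD index []
    let final' :=
      if is_biggest_subset set1 list_of_sets (index + 1) max_len then
        final_list_of_sets ++ [PySem.List.sorted set1 (fun x => x) false]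
      else final_list_of_sets
    pvMergeLoop list_of_sets (index + 1) max_len final'
  else final_list_of_sets
termination_by max_len - index

def merge_cliques (cliques_set : List String) : List (List String) :=
  let clique_list := PySem.List.sorted cliques_set (fun s => PySem.Str.len s) false
  let list_of_sets := clique_list.foldl (fun acc c => acc ++ [PySem.Set.ofList (pvSplitSpace c)]) []
  pvMergeLoop list_of_sets 0 list_of_sets.length []

-- ===== PORT B =====
-- occ: token -> ascending list of the indices of the sets containing it (Source B's occ dict);
-- built from the (token, index) pairs in Source B's nested-loop iteration order
def pvOccPairs (sets : List (PySem.Set String)) : List (String × Nat) :=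
  sets.zipIdx.flatMap (fun p => p.1.map (fun x => (x, p.2)))

def pvOcc (sets : List (PySem.Set String)) : PySem.Dict String (List Nat) :=
  (pvOccPairs sets).foldl (fun d p => d.modify p.1 [] (fun l => l ++ [p.2])) PySem.Dict.empty

-- Source B's candidate list: the occurrence list of the token whose list is shortest (min(..., key=len))
def pvCand (occ : PySem.Dict String (List Nat)) (toks : List String) : List Nat :=
  (PySem.List.min? (toks.map (fun x => occ.getD x [])) (fun l => l.length)).getD []

-- Source B's inner loop: walk the candidates newest-first, stop at indices ≤ i, report a found superset
def pvScanRev (s : PySem.Set String) (sets : List (PySem.Set String)) (i : Nat) : List Nat → Bool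
  | [] => false
  | j :: rest =>
    if j ≤ i then false
    else if PySem.Set.issubset s (sets.getD j []) then true
    else pvScanRev s sets i rest

-- Source B's outer loop body for the pair p = (set, index)
def pvStep (sets : List (PySem.Set String)) (occ : PySem.Dict String (List Nat))
    (out : List (List String)) (p : PySem.Set String × Nat) : List (List String) :=
  let toks := PySem.List.sorted p.1 (fun x => x) false
  if pvScanRev p.1 sets p.2 (pvCand occ toks).reverse then out else out ++ [toks]

def merge_cliques_alt (cliques_set : List String) : List (List String) :=
  let sets := (PySem.List.sorted cliques_set (fun s => PySem.Str.len s) false).map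
      (fun c => PySem.Set.ofList (pvSplitSpace c))
  let occ := pvOcc sets
  sets.zipIdx.foldl (pvStep sets occ) []

-- ===== PRECONDITION & SPEC =====
def Spec_merge_cliques (cliques_set : List String) (out : List (List String)) : Prop := out = merge_cliques_alt cliques_set
instance (cliques_set : List String) (out : List (List String)) : Decidable (Spec_merge_cliques cliques_set out) := by unfold Spec_merge_cliques; infer_instance

-- ===== CLAIM (what is proved, stated in full; the proofs are below) =====
def Claim_equal_merge_cliques : Prop := ∀ (cliques_set : List String), Dom_merge_cliques cliques_set → Spec_merge_cliques cliques_set (merge_cliques cliques_set)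

-- ===== LEMMAS AND PROOFS =====

-- str.split(sep) always yields at least one piece
theorem pvSplitGo_ne_nil (sep : List Char) :
    ∀ (fuel : Nat) (l cur : List Char) (acc : List (List Char)),
      PySem.Chars.splitOn.go sep fuel l cur acc ≠ [] := by
  intro fuel
  induction fuel with
  | zero => intro l cur acc; simp [PySem.Chars.splitOn.go]
  | succ n ih =>
    intro l cur acc
    cases l with
    | nil => simp [PySem.Chars.splitOn.go]
    | cons c rest =>
      rw [PySem.Chars.splitOn.go]
      split
      · exact ih _ _ _
      · exact ih _ _ _

theorem pvSplitSpace_ne_nil (c : String) : pvSplitSpace c ≠ [] := by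
  unfold pvSplitSpace
  simp [PySem.Str.split?, PySem.Chars.split?, PySem.Chars.splitOn]
  exact pvSplitGo_ne_nil _ _ _ _ _

theorem pvOfListSplit_ne_nil (c : String) : PySem.Set.ofList (pvSplitSpace c) ≠ [] := by
  rcases hx : pvSplitSpace c with _ | ⟨x, t⟩
  · exact absurd hx (pvSplitSpace_ne_nil c)
  · rw [PySem.Set.ofList_cons]; simp

-- the occurrence list of a token, as a filter of the (token, index) pair list
theorem pvOcc_getD (sets : List (PySem.Set String)) (x : String) :
    (pvOcc sets).getD x []
      = ((pvOccPairs sets).filter (fun p => p.1 == x)).map (fun p => p.2) := by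
  unfold pvOcc
  rw [PySem.Dict.getD_foldl_modify_append]
  simp

theorem pvMem_occ (sets : List (PySem.Set String)) (x : String) (j : Nat) :
    j ∈ (pvOcc sets).getD x [] ↔ j < sets.length ∧ x ∈ sets.getD j [] := by
  rw [pvOcc_getD]
  simp only [List.mem_map, List.mem_filter, pvOccPairs, List.mem_flatMap,
    List.mem_zipIdx_iff_getElem?, beq_iff_eq]
  constructor
  · rintro ⟨p, ⟨⟨q, hq, y, hy, rfl⟩, hx⟩, rfl⟩
    dsimp only at hx
    subst hx
    rcases List.getElem?_eq_some_iff.mp hq with ⟨hlt, hget⟩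
    exact ⟨hlt, by rw [List.getD_eq_getElem?_getD, List.getElem?_eq_getElem hlt]; simpa [hget] using hy⟩
  · rintro ⟨hlt, hx⟩
    refine ⟨(x, j), ⟨⟨(sets[j], j), ?_, x, ?_, rfl⟩, rfl⟩, rfl⟩
    · simp
    · rw [List.getD_eq_getElem?_getD, List.getElem?_eq_getElem hlt] at hx
      exact hx

-- lower bound for indices produced from a zipIdx suffix
theorem pvOccPairs_lb (sets : List (PySem.Set String)) :
    ∀ (k : Nat) (q : String × Nat),
      q ∈ (sets.zipIdx k).flatMap (fun p => p.1.map (fun x => (x, p.2))) → k ≤ q.2 := by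
  induction sets with
  | nil => intro k q h; simp at h
  | cons s rest ih =>
    intro k q h
    rw [List.zipIdx_cons, List.flatMap_cons, List.mem_append] at h
    rcases h with h | h
    · rcases List.mem_map.mp h with ⟨y, _, rfl⟩; exact Nat.le_refl k
    · exact Nat.le_of_succ_le (ih (k + 1) q h)

theorem pvOccPairs_pairwise (sets : List (PySem.Set String)) :
    ∀ (k : Nat),
      ((sets.zipIdx k).flatMap (fun p => p.1.map (fun x => (x, p.2)))).Pairwise
        (fun p q => p.2 ≤ q.2) := by
  induction sets with
  | nil => intro k; simp
  | cons s rest ih =>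
    intro k
    rw [List.zipIdx_cons, List.flatMap_cons, List.pairwise_append]
    refine ⟨?_, ih (k + 1), ?_⟩
    · rw [List.pairwise_map]
      exact List.pairwise_of_forall (fun _ _ => Nat.le_refl k)
    · intro a ha b hb
      rcases List.mem_map.mp ha with ⟨y, _, rfl⟩
      exact Nat.le_of_succ_le (pvOccPairs_lb rest (k + 1) b hb)

theorem pvOcc_sorted (sets : List (PySem.Set String)) (x : String) :
    ((pvOcc sets).getD x []).Pairwise (· ≤ ·) := by
  rw [pvOcc_getD]
  rw [List.pairwise_map]
  exact List.Pairwise.sublist List.filter_sublist (pvOccPairs_pairwise sets 0)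

-- the candidate walk on a descending list is an existence test over the indices > i
theorem pvScanRev_iff (s : PySem.Set String) (sets : List (PySem.Set String)) (i : Nat) :
    ∀ (L : List Nat), L.Pairwise (fun a b => b ≤ a) →
      (pvScanRev s sets i L = true ↔
        ∃ j ∈ L, i < j ∧ PySem.Set.issubset s (sets.getD j []) = true) := by
  intro L
  induction L with
  | nil => intro _; rw [pvScanRev]; simp
  | cons j rest ih =>
    intro hp
    rcases List.pairwise_cons.mp hp with ⟨hle, hrest⟩
    rw [pvScanRev]
    by_cases hji : j ≤ i
    · rw [if_pos hji]
      simp only [Bool.false_eq_true, false_iff]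
      rintro ⟨j', hj', hij', _⟩
      rcases List.mem_cons.mp hj' with rfl | hmem
      · omega
      · exact absurd (Nat.lt_of_lt_of_le hij' (hle j' hmem)) (by omega)
    · rw [if_neg hji]
      by_cases hsub : PySem.Set.issubset s (sets.getD j []) = true
      · rw [if_pos hsub]
        exact ⟨fun _ => ⟨j, List.mem_cons_self .., by omega, hsub⟩, fun _ => rfl⟩
      · rw [if_neg hsub, ih hrest]
        constructor
        · rintro ⟨j', hj', h1, h2⟩; exact ⟨j', List.mem_cons_of_mem j hj', h1, h2⟩
        · rintro ⟨j', hj', h1, h2⟩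
          rcases List.mem_cons.mp hj' with rfl | hmem
          · exact absurd h2 hsub
          · exact ⟨j', hmem, h1, h2⟩

-- Source B's candidate test ≡ "some strictly later set is a superset" (A's negated is_biggest_subset)
theorem pvScan_cand (sets : List (PySem.Set String)) (s : PySem.Set String) (hs : s ≠ [])
    (i : Nat) :
    pvScanRev s sets i ((pvCand (pvOcc sets) (PySem.List.sorted s (fun x => x) false)).reverse)
      = (sets.drop (i + 1)).any (fun t => PySem.Set.issubset s t) := by
  -- the candidate list is the occurrence list of some token x* of s
  obtain ⟨x, hxs, hcand⟩ :
      ∃ x, x ∈ s ∧ pvCand (pvOcc sets) (PySem.List.sorted s (fun x => x) false)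
        = (pvOcc sets).getD x [] := by
    rcases hmin : PySem.List.min?
        ((PySem.List.sorted s (fun x => x) false).map (fun x => (pvOcc sets).getD x []))
        (fun l => l.length) with _ | m
    · rw [PySem.List.min?_eq_none_iff] at hmin
      rw [List.map_eq_nil_iff, PySem.List.sorted_eq_nil_iff] at hmin
      exact absurd hmin hs
    · rcases List.mem_map.mp (PySem.List.min?_mem hmin) with ⟨x, hx, hxm⟩
      exact ⟨x, (PySem.List.mem_sorted s _ false x).mp hx, by rw [pvCand, hmin, Option.getD_some, hxm]⟩
  rw [hcand]
  have hpw : (((pvOcc sets).getD x []).reverse).Pairwise (fun a b => b ≤ a) :=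
    List.pairwise_reverse.mpr (pvOcc_sorted sets x)
  apply Bool.eq_iff_iff.mpr
  rw [pvScanRev_iff s sets i _ hpw, List.any_eq_true]
  constructor
  · rintro ⟨j, hj, hij, hsub⟩
    rw [List.mem_reverse] at hj
    rcases (pvMem_occ sets x j).mp hj with ⟨hjn, _⟩
    refine ⟨sets.getD j [], ?_, hsub⟩
    have h1 : j - (i + 1) < (sets.drop (i + 1)).length := by
      rw [List.length_drop]; omega
    have h2 : (sets.drop (i + 1))[j - (i + 1)] = sets[i + 1 + (j - (i + 1))] :=
      List.getElem_drop
    rw [List.getD_eq_getElem?_getD, List.getElem?_eq_getElem hjn]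
    simp only [show i + 1 + (j - (i + 1)) = j from by omega] at h2
    simpa [← h2] using List.getElem_mem h1
  · rintro ⟨t, ht, hsub⟩
    rcases List.mem_iff_getElem.mp ht with ⟨idx, hidx, hget⟩
    have hlen : idx < sets.length - (i + 1) := by
      simpa [List.length_drop] using hidx
    have hget2 : sets[i + 1 + idx]'(by omega) = t := by
      rw [← hget]; exact (List.getElem_drop).symm
    refine ⟨i + 1 + idx, ?_, by omega, ?_⟩
    · rw [List.mem_reverse]
      refine (pvMem_occ sets x (i + 1 + idx)).mpr ⟨by omega, ?_⟩
      rw [List.getD_eq_getElem?_getD, List.getElem?_eq_getElem (by omega : i + 1 + idx < sets.length)]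
      have hxt : x ∈ t := (PySem.Set.issubset_iff s t).mp hsub x hxs
      simpa [hget2] using hxt
    · rw [List.getD_eq_getElem?_getD, List.getElem?_eq_getElem (by omega : i + 1 + idx < sets.length)]
      simpa [hget2] using hsub

theorem pv_isBiggest_eq (s : PySem.Set String) (sets : List (PySem.Set String)) (index : Nat) :
    is_biggest_subset s sets index sets.length
      = !((sets.drop index).any (fun t => PySem.Set.issubset s t)) := by
  by_cases h : index < sets.length
  · have hdrop : sets.drop index = sets.getD index [] :: sets.drop (index + 1) := by
      rw [List.getD_eq_getElem?_getD, List.getElem?_eq_getElem h]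
      simp [(List.drop_eq_getElem_cons h).symm]
    rw [is_biggest_subset, if_pos h, hdrop, List.any_cons]
    by_cases hs : PySem.Set.issubset s (sets.getD index []) = true
    · rw [if_pos hs, hs]; rfl
    · have hs' : PySem.Set.issubset s (sets.getD index []) = false :=
        Bool.eq_false_iff.mpr hs
      rw [if_neg hs, pv_isBiggest_eq s sets (index + 1), hs']
      rfl
  · rw [is_biggest_subset, if_neg h, List.drop_eq_nil_of_le (Nat.le_of_not_lt h)]
    rfl
termination_by sets.length - index

-- the two loops agree from any start index
theorem pvLoop_eq (sets : List (PySem.Set String)) (hne : ∀ t ∈ sets, t ≠ [])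
    (index : Nat) (acc : List (List String)) :
      ((sets.drop index).zipIdx index).foldl (pvStep sets (pvOcc sets)) acc
        = pvMergeLoop sets index sets.length acc := by
  by_cases h : index < sets.length
  · have hdrop : sets.drop index = sets.getD index [] :: sets.drop (index + 1) := by
      rw [List.getD_eq_getElem?_getD, List.getElem?_eq_getElem h]
      simp [(List.drop_eq_getElem_cons h).symm]
    have hmem : sets.getD index [] ∈ sets := by
      rw [List.getD_eq_getElem?_getD, List.getElem?_eq_getElem h]
      exact List.getElem_mem h
    have hsne : sets.getD index [] ≠ [] := hne _ hmem
    rw [hdrop, List.zipIdx_cons, List.foldl_cons, pvMergeLoop, if_pos h]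
    dsimp only
    rw [pvLoop_eq sets hne (index + 1)]
    unfold pvStep
    dsimp only
    rw [pvScan_cand sets _ hsne index, pv_isBiggest_eq]
    by_cases hv : ((sets.drop (index + 1)).any fun t => PySem.Set.issubset (sets.getD index []) t) = true
    · rw [hv]
      have hb : (!true) = false := rfl
      rw [hb, if_pos rfl, if_neg Bool.false_ne_true]
    · have hv' : ((sets.drop (index + 1)).any fun t => PySem.Set.issubset (sets.getD index []) t) = false :=
        Bool.eq_false_iff.mpr hv
      rw [hv']
      have hb : (!false) = true := rfl
      rw [hb, if_neg Bool.false_ne_true, if_pos rfl]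
  · rw [pvMergeLoop, if_neg h, List.drop_eq_nil_of_le (Nat.le_of_not_lt h)]
    rfl
termination_by sets.length - index

-- ===== VERDICT (by name: the statement is the Claim_ definition above) =====
theorem merge_cliques_spec : Claim_equal_merge_cliques := by
  intro cliques_set _
  unfold Spec_merge_cliques merge_cliques merge_cliques_alt
  dsimp only
  rw [PySem.List.foldl_append_singleton_eq_map, List.nil_append]
  have hne : ∀ t ∈ (PySem.List.sorted cliques_set (fun s => PySem.Str.len s) false).map
      (fun c => PySem.Set.ofList (pvSplitSpace c)), t ≠ [] := by
    intro t ht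
    rcases List.mem_map.mp ht with ⟨c, _, rfl⟩
    exact pvOfListSplit_ne_nil c
  rw [← pvLoop_eq _ hne 0 [], List.drop_zero]
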